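-- pv_equiv track=rewrite | github.com/jaytula/python-wars | mr_martingale.py | martingale
-- ===== SOURCE A (Python) =====
-- from typing import List
--
-- def martingale(bank: int, outcomes: List[int]):
--     balance = bank
--     unit = 1
--     for outcome in outcomes:
--       balance -= unit*100
--       if outcome == 1:
--         balance += 2 * unit * 100
--         unit = 1
--       else:
--         unit *= 2
--     return balance
-- ===== SOURCE B (Python) =====
-- def martingale(bank: int, outcomes):
--     wins = outcomes.count(1)
--     t = 0
--     for x in reversed(outcomes):
--         if x == 1:
--             break
--         t += 1
--     return bank + 100 * wins - 100 * (2 ** t - 1)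
-- ===== Notes on version B (the rewrite author's own statement) =====
-- stated objective: faster
-- what changed: Replaced the stateful balance/unit simulation by a closed form bank + 100*count(1) - 100*(2^t - 1), where t is the trailing run of non-win outcomes; A keeps doubling a big-int unit through every loss run while B exponentiates only once for the trailing run.
import Mathlib
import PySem

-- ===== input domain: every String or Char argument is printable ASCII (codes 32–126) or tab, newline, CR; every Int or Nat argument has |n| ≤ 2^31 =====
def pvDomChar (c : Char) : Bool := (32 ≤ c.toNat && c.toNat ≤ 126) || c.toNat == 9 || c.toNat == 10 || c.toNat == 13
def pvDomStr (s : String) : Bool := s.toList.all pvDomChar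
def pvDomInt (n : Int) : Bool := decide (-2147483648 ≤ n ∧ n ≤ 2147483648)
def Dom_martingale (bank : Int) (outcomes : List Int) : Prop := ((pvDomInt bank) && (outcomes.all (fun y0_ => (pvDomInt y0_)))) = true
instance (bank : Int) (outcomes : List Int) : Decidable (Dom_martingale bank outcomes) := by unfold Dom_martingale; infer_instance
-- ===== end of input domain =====

-- B replaces A's stateful balance/unit simulation by the closed form
-- bank + 100*wins - 100*(2^t - 1), t = trailing run of non-win outcomes (objective: faster,
-- measured: A doubles a big integer through every loss run).

-- ===== PORT A =====
-- the for-loop of A over state (balance, unit)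
def martingaleLoopA (balance unit : Int) : List Int → Int
  | [] => balance
  | outcome :: rest =>
    let balance := balance - unit * 100
    if outcome == 1 then
      martingaleLoopA (balance + 2 * unit * 100) 1 rest
    else
      martingaleLoopA balance (unit * 2) rest

def martingale (bank : Int) (outcomes : List Int) : Int :=
  martingaleLoopA bank 1 outcomes

-- ===== PORT B =====
-- Source B's 'for x in reversed(outcomes): if x == 1: break; t += 1' counts the trailing non-1 run
def martingaleTrailA (t : Int) : List Int → Int
  | [] => t
  | x :: rest => if x == 1 then t else martingaleTrailA (t + 1) rest

def martingale_alt (bank : Int) (outcomes : List Int) : Int :=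
  let wins : Int := PySem.List.count outcomes 1
  let t : Int := martingaleTrailA 0 outcomes.reverse
  bank + 100 * wins - 100 * (2 ^ t.toNat - 1)

-- ===== PRECONDITION & SPEC =====
def Spec_martingale (bank : Int) (outcomes : List Int) (out : Int) : Prop := out = martingale_alt bank outcomes
instance (bank : Int) (outcomes : List Int) (out : Int) : Decidable (Spec_martingale bank outcomes out) := by unfold Spec_martingale; infer_instance

-- ===== CLAIM (what is proved, stated in full; the proofs are below) =====
def Claim_equal_martingale : Prop := ∀ (bank : Int) (outcomes : List Int), Dom_martingale bank outcomes → Spec_martingale bank outcomes (martingale bank outcomes)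

-- ===== LEMMAS AND PROOFS =====

-- B's trailing-run loop counts takeWhile (≠ 1), offset by the accumulator
lemma trailA_eq (l : List Int) : ∀ t : Int,
    martingaleTrailA t l = t + ((l.takeWhile (fun y => y != 1)).length : Int) := by
  induction l with
  | nil => intro t; simp [martingaleTrailA]
  | cons x xs ih =>
    intro t
    by_cases hx : x = 1
    · simp [martingaleTrailA, hx]
    · simp only [martingaleTrailA, List.takeWhile_cons, beq_iff_eq, hx, if_false,
        bne_iff_ne, ne_eq, not_false_eq_true, if_true, ih, List.length_cons]
      push_cast; ring

-- helper: a takeWhile of full length is the whole list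
lemma takeWhile_full {α : Type} {p : α → Bool} {l : List α}
    (h : (l.takeWhile p).length = l.length) : l.takeWhile p = l :=
  (List.takeWhile_sublist p).eq_of_length h

-- trailing run of a cons: unchanged if a win occurs later, else the whole tail plus x
lemma take_reverse_cons (x : Int) (xs : List Int) :
    ((x :: xs).reverse.takeWhile (fun y => y != 1)).length =
      if (1 : Int) ∈ xs then (xs.reverse.takeWhile (fun y => y != 1)).length
      else xs.length + (if x = 1 then 0 else 1) := by
  have h := List.takeWhile_append (p := fun y : Int => y != 1) (xs := xs.reverse) (ys := [x])
  by_cases hm : (1 : Int) ∈ xs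
  · -- some element of xs.reverse fails the predicate, so takeWhile stops inside xs.reverse
    have hne : (xs.reverse.takeWhile (fun y => y != 1)).length ≠ xs.reverse.length := by
      intro hlen
      have hall := List.takeWhile_eq_self_iff.mp
        (takeWhile_full hlen)
      have := hall 1 (List.mem_reverse.mpr hm)
      simp at this
    simp only [List.reverse_cons, h, if_neg hne, if_pos hm]
  · have hall : ∀ y ∈ xs.reverse, (fun y : Int => y != 1) y = true := by
      intro y hy
      have : y ∈ xs := List.mem_reverse.mp hy
      simp only [bne_iff_ne, ne_eq]
      intro h1; exact hm (h1 ▸ this)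
    have heq : xs.reverse.takeWhile (fun y => y != 1) = xs.reverse :=
      List.takeWhile_eq_self_iff.mpr hall
    have hlen : (xs.reverse.takeWhile (fun y => y != 1)).length = xs.reverse.length := by
      rw [heq]
    simp only [List.reverse_cons, h, if_pos hlen, if_neg hm]
    by_cases hx : x = 1
    · simp [hx, List.takeWhile]
    · have hxb : (x != 1) = true := by simp [hx]
      simp [List.takeWhile, hxb, hx]

-- the key invariant of A's loop, for an arbitrary starting unit
lemma loopA_closed (xs : List Int) : ∀ b u : Int,
    martingaleLoopA b u xs =
      if (1 : Int) ∈ xs then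
        b + 100 * u + 100 * ((xs.count 1 : Int) - 1)
          - 100 * (2 ^ (xs.reverse.takeWhile (fun y => y != 1)).length - 1)
      else b - 100 * u * (2 ^ xs.length - 1) := by
  induction xs with
  | nil => intro b u; simp [martingaleLoopA]
  | cons x xs ih =>
    intro b u
    have htr := take_reverse_cons x xs
    by_cases hx : x = 1
    · subst hx
      simp only [martingaleLoopA, beq_self_eq_true, if_true, ih]
      have hmem : (1 : Int) ∈ (1 : Int) :: xs := List.mem_cons_self ..
      rw [if_pos hmem]
      by_cases hm : (1 : Int) ∈ xs
      · rw [if_pos hm, htr, if_pos hm]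
        simp; ring
      · rw [if_neg hm, htr, if_neg hm]
        have hc : xs.count 1 = 0 := List.count_eq_zero.mpr hm
        have hlen : (xs.reverse.takeWhile (fun y => y != 1)).length = xs.length := by
          have hall : ∀ y ∈ xs.reverse, (fun y : Int => y != 1) y = true := by
            intro y hy
            have : y ∈ xs := List.mem_reverse.mp hy
            simp only [bne_iff_ne, ne_eq]; intro h1; exact hm (h1 ▸ this)
          rw [List.takeWhile_eq_self_iff.mpr hall, List.length_reverse]
        simp [hc]; ring
    · simp only [martingaleLoopA, beq_iff_eq, hx, if_false, ih]
      by_cases hm : (1 : Int) ∈ xs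
      · have hmem : (1 : Int) ∈ x :: xs := List.mem_cons_of_mem _ hm
        rw [if_pos hm, if_pos hmem, htr, if_pos hm]
        simp [hx]; ring
      · have hmem : (1 : Int) ∉ x :: xs := by
          intro hmem'
          rcases List.mem_cons.mp hmem' with h | h
          · exact hx (Eq.symm h)
          · exact hm h
        rw [if_neg hm, if_neg hmem]
        simp only [List.length_cons]
        have : (2 : Int) ^ (xs.length + 1) = 2 * 2 ^ xs.length := by ring
        rw [this]; ring

-- cast bookkeeping: B's Int-valued trailing count, toNat'ed back, is the Nat length
lemma trail_toNat (xs : List Int) :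
    ((martingaleTrailA 0 xs.reverse : Int)).toNat
      = (xs.reverse.takeWhile (fun y => y != 1)).length := by
  rw [trailA_eq]; simp

-- ===== VERDICT (by name: the statement is the Claim_ definition above) =====
theorem martingale_spec : Claim_equal_martingale := by
  intro bank outcomes _
  unfold Spec_martingale martingale martingale_alt
  show martingaleLoopA bank 1 outcomes =
    bank + 100 * ((PySem.List.count outcomes 1 : Nat) : Int)
      - 100 * (2 ^ (martingaleTrailA 0 outcomes.reverse).toNat - 1)
  rw [loopA_closed, trail_toNat]
  have hcnt : (PySem.List.count outcomes 1 : Int) = (outcomes.count 1 : Int) := by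
    simp [PySem.List.count_eq]
  rw [hcnt]
  by_cases hm : (1 : Int) ∈ outcomes
  · rw [if_pos hm]
    have h1 : 1 ≤ outcomes.count 1 := List.one_le_count_iff.mpr hm
    have : (1 : Int) ≤ (outcomes.count 1 : Int) := by exact_mod_cast h1
    ring
  · rw [if_neg hm]
    have hc : outcomes.count 1 = 0 := List.count_eq_zero.mpr hm
    have hlen : (outcomes.reverse.takeWhile (fun y => y != 1)).length = outcomes.length := by
      have hall : ∀ y ∈ outcomes.reverse, (fun y : Int => y != 1) y = true := by
        intro y hy
        have : y ∈ outcomes := List.mem_reverse.mp hy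
        simp only [bne_iff_ne, ne_eq]; intro h1; exact hm (h1 ▸ this)
      rw [List.takeWhile_eq_self_iff.mpr hall, List.length_reverse]
    rw [hc, hlen]; push_cast; ring
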